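-- pv_equiv track=rewrite | github.com/Ruikatora/Wobblecode-Editor | spooler.py | spool
-- ===== SOURCE A (Python) =====
-- _seperator_map = {
--         "|00" : ":",
--         "|01" : ";",
--         "|10" : "<",
--         "|11" : "=",
--         "||0" : ">",
--         "||1" : "?",
--         "|0|" : "@",
--         "|1|" : "[",
--         "|||" : "#",
--         "|0" : "]",
--         "|1" : "^",
--         "||" : "_",
--         "|" : "*"
-- }
--
-- def spool(raw_binary:str) -> str:
--     '''Spools (compresses) binary code and seperator into unwrapped code.'''
--     #Replace all seperators with their corresponding symbol
--     for key, value in _seperator_map.items():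
--         raw_binary = raw_binary.replace(key, value)
--
--     #Convert to a list containing either:
--     # - Binary digits
--     # - New seperators
--     code_lst = list()
--     s = ""
--
--     for c in raw_binary:
--         if c in "01":
--             s += c
--         else:
--             if s != "":
--                 code_lst.append(s)
--             code_lst.append(c)
--             s = ""
--
--     if s != "":
--         code_lst.append(s)
--
--     # Parse the binary digits and create a new list:
--     # - A string of lowercase alphabets represents the number of leading zeroes
--     # - Remaining binary up to 20 digits each
--     # - Seperators are ignored
--     bin_code_lst = list()
--     for b in code_lst:
--         if b[0] not in "01": #Ignore seperators
--             bin_code_lst.append(b)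
--             continue
--         while (True):
--             bin_no_lead = str(int(b)) #Remove lead 0s by casting to int
--             if bin_no_lead == '0':
--                 bin_no_lead = ''
--             lead_zeroes = len(b) - len(bin_no_lead) #Count lead 0s by subtracting
--             if lead_zeroes > 0: #Append a-t based on lead 0s
--                 ts = lead_zeroes // 20
--                 remain = lead_zeroes % 20
--                 bin_code_lst.append('t'*ts)
--                 if remain > 0:
--                     bin_code_lst.append(chr(ord('a') - 1 + remain))
--
--             if len(bin_no_lead) > 0: #If there are digits other than 0, append them
--                 bin_code_lst.append(bin_no_lead[:20])
--                 if len(bin_no_lead) > 20: #If there are more than 20 digits, restart from the 21st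
--                     b = bin_no_lead[20:]
--                     continue
--             break
--
--     #Convert binary digits to hexadecimal
--     for i, b in enumerate(bin_code_lst):
--         is_binary = any([c for c in b if c in "01"])
--         if is_binary:
--             bin_code_lst[i] = hex(int(b,2))[2:].upper()
--
--     return ''.join(bin_code_lst)
-- ===== SOURCE B (Python) =====
-- _seperator_map = {
--         "|00" : ":",
--         "|01" : ";",
--         "|10" : "<",
--         "|11" : "=",
--         "||0" : ">",
--         "||1" : "?",
--         "|0|" : "@",
--         "|1|" : "[",
--         "|||" : "#",
--         "|0" : "]",
--         "|1" : "^",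
--         "||" : "_",
--         "|" : "*"
-- }
--
-- def _encode_run(run):
--     '''Encode one maximal run of binary digits, emitting final pieces directly.'''
--     out = ""
--     while run:
--         digits = str(int(run))          # decimal cast strips the leading zeros (run is all 0/1)
--         if digits == '0':
--             digits = ''
--         zeros = len(run) - len(digits)
--         out += 't' * (zeros // 20)
--         if zeros % 20:
--             out += chr(ord('a') - 1 + zeros % 20)
--         if not digits:
--             break
--         out += hex(int(digits[:20], 2))[2:].upper()
--         run = digits[20:]
--     return out
--
-- def spool(raw_binary:str) -> str:
--     '''Spools (compresses) binary code and seperator into unwrapped code.'''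
--     for key, value in _seperator_map.items():
--         raw_binary = raw_binary.replace(key, value)
--
--     # Single pass: walk maximal binary runs and lone separator chars,
--     # emitting each run's encoding directly (no intermediate lists, no mutation).
--     out = ""
--     i = 0
--     n = len(raw_binary)
--     while i < n:
--         if raw_binary[i] in "01":
--             j = i
--             while j < n and raw_binary[j] in "01":
--                 j += 1
--             out += _encode_run(raw_binary[i:j])
--             i = j
--         else:
--             out += raw_binary[i]
--             i += 1
--     return out
-- ===== Notes on version B (the rewrite author's own statement) =====
-- stated objective: faster
-- what changed: A's three sequential passes (tokenize into a list, encode each token into a second list, then hex-rewrite that list in place before joining) are replaced by a single scan over the string that encodes each maximal binary run directly and appends separator characters verbatim, with no intermediate lists and no mutation.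
import Mathlib
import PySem

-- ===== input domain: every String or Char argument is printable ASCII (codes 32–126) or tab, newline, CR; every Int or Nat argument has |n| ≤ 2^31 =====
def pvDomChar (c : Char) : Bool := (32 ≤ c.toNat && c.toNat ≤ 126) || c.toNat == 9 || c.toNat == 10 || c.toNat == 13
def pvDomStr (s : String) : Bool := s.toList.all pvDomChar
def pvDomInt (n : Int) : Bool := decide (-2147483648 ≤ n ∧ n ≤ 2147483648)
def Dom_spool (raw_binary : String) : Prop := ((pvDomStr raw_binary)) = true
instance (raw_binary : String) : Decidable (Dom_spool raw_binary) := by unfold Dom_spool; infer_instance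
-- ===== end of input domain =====

-- B replaces A's three list-building passes (tokenize, encode, in-place hex rewrite) with a single
-- scan over the string that encodes each maximal binary run directly (no intermediate lists);
-- a timing run measured B faster by a constant factor.


-- ===== SHARED PRIMITIVES (ports of primitive expressions both Pythons contain verbatim) =====

-- Python `c in "01"`
def pyBin (c : Char) : Bool := c == '0' || c == '1'

-- Python `int(b)`: exact on the nonempty decimal-digit strings this program feeds it
-- (int()'s sign/whitespace/underscore handling is never reached here).
def parseDec (cs : List Char) : Nat := cs.foldl (fun a c => 10 * a + (c.toNat - 48)) 0

-- Python `str(n)` for n ≥ 0 (the only values produced here)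
def printDec (n : Nat) : List Char :=
  if _h : n < 10 then [Nat.digitChar n] else printDec (n / 10) ++ [Nat.digitChar (n % 10)]
decreasing_by exact Nat.div_lt_self (by omega) (by omega)

-- Python `str(int(b))` on the digit strings reached here
def pyStrInt (cs : List Char) : List Char := printDec (parseDec cs)

-- Python `int(b, 2)`: exact on the 0/1-digit strings this program feeds it
def parseBin (cs : List Char) : Nat := cs.foldl (fun a c => 2 * a + (c.toNat - 48)) 0

-- Python `hex(n)[2:].upper()` for n ≥ 0 (the only values produced here)
def hexDigitU (n : Nat) : Char := if n < 10 then Nat.digitChar n else Char.ofNat (55 + n)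
def hexCore (n : Nat) : List Char :=
  if _h : n = 0 then [] else hexCore (n / 16) ++ [hexDigitU (n % 16)]
decreasing_by exact Nat.div_lt_self (by omega) (by omega)
def printHexUpper (n : Nat) : List Char := if n = 0 then ['0'] else hexCore n

-- the module-level separator dict (insertion order) and the substitution loop both functions begin with
def sepMap : List (String × String) :=
  [("|00", ":"), ("|01", ";"), ("|10", "<"), ("|11", "="), ("||0", ">"), ("||1", "?"),
   ("|0|", "@"), ("|1|", "["), ("|||", "#"), ("|0", "]"), ("|1", "^"), ("||", "_"), ("|", "*")]
def sepSubst (s : String) : String :=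
  sepMap.foldl (fun r kv => PySem.Str.replace r kv.1 kv.2) s

-- ===== PORT A =====

-- the `while (True)` loop of A's second pass; fuel = len(b) is a totality guard only
-- (each restart drops ≥ 20 chars, so the loop runs at most len(b) times)
def spoolWhile : Nat → List Char → List (List Char) → List (List Char)
  | 0, _, acc => acc
  | fuel + 1, b, acc =>
      let bin_no_lead0 := pyStrInt b
      let bin_no_lead := if bin_no_lead0 = ['0'] then [] else bin_no_lead0
      let lead_zeroes := b.length - bin_no_lead.length
      let acc1 := if lead_zeroes > 0 then
          (acc ++ [List.replicate (lead_zeroes / 20) 't']) ++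
            (if lead_zeroes % 20 > 0 then [[Char.ofNat ('a'.toNat - 1 + lead_zeroes % 20)]] else [])
        else acc
      if bin_no_lead.length > 0 then
        if bin_no_lead.length > 20 then
          spoolWhile fuel (bin_no_lead.drop 20) (acc1 ++ [bin_no_lead.take 20])
        else acc1 ++ [bin_no_lead.take 20]
      else acc1

-- body of A's third pass (hex-convert an entry iff it contains a binary digit)
def hexFix (b : List Char) : List Char :=
  if b.any pyBin then printHexUpper (parseBin b) else b

def spool (raw_binary : String) : String :=
  let raw := sepSubst raw_binary
  -- first loop: split into binary runs and separator chars
  let st := raw.toList.foldl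
    (fun (p : List (List Char) × List Char) c =>
      if pyBin c then (p.1, p.2 ++ [c])
      else ((if p.2 ≠ [] then p.1 ++ [p.2] else p.1) ++ [[c]], []))
    ([], [])
  let code_lst := if st.2 ≠ [] then st.1 ++ [st.2] else st.1
  -- second loop: run the while(True) on each binary element, keep separators
  let bin_code_lst := code_lst.foldl
    (fun acc b =>
      match b with
      | [] => acc          -- unreachable: every element of code_lst is nonempty (b[0] would raise)
      | c :: _ => if !(pyBin c) then acc ++ [b] else spoolWhile b.length b acc)
    []
  -- third loop: in-place hex rewrite (each entry only replaces itself, i.e. a map)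
  String.ofList (bin_code_lst.map hexFix).flatten

-- ===== PORT B =====

-- B's `_encode_run`; fuel = len(run) is a totality guard only (the loop drops ≥ 20 chars per pass)
def encodeRun : Nat → List Char → List Char
  | 0, _ => []
  | _ + 1, [] => []
  | fuel + 1, run =>
      let digits0 := pyStrInt run
      let digits := if digits0 = ['0'] then [] else digits0
      let zeros := run.length - digits.length
      let out0 := List.replicate (zeros / 20) 't'
      let out := if zeros % 20 > 0 then out0 ++ [Char.ofNat ('a'.toNat - 1 + zeros % 20)] else out0
      if digits = [] then out
      else out ++ printHexUpper (parseBin (digits.take 20)) ++ encodeRun fuel (digits.drop 20)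

-- B's single scan: maximal binary runs are encoded directly, separators pass through
def spoolScan (cs : List Char) : List Char :=
  match cs with
  | [] => []
  | c :: rest =>
      if h : pyBin c then
        let run := (c :: rest).takeWhile pyBin
        encodeRun run.length run ++ spoolScan ((c :: rest).dropWhile pyBin)
      else c :: spoolScan rest
termination_by cs.length
decreasing_by
  · simp only [List.dropWhile_cons, h, if_true]
    exact Nat.lt_succ_of_le (List.length_dropWhile_le _ _)
  · simp

def spool_alt (raw_binary : String) : String :=
  String.ofList (spoolScan (sepSubst raw_binary).toList)

-- ===== PRECONDITION & SPEC =====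
def Spec_spool (raw_binary : String) (out : String) : Prop := out = spool_alt raw_binary
instance (raw_binary : String) (out : String) : Decidable (Spec_spool raw_binary out) := by unfold Spec_spool; infer_instance

-- ===== CLAIM (what is proved, stated in full; the proofs are below) =====
def Claim_equal_spool : Prop := ∀ (raw_binary : String), Dom_spool raw_binary → Spec_spool raw_binary (spool raw_binary)

-- ===== LEMMAS AND PROOFS =====

def tokAux (s : List Char) : List Char → List (List Char)
  | [] => if s = [] then [] else [s]
  | c :: r => if pyBin c then tokAux (s ++ [c]) r
              else (if s = [] then [] else [s]) ++ [c] :: tokAux [] r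

theorem spoolWhile_acc (fuel : Nat) : ∀ (b : List Char) (acc : List (List Char)),
    spoolWhile fuel b acc = acc ++ spoolWhile fuel b [] := by
  induction fuel with
  | zero => intro b acc; simp [spoolWhile]
  | succ f ih =>
      intro b acc
      simp only [spoolWhile]
      split_ifs <;>
        (try (rw [ih]; conv_rhs => rw [ih])) <;>
        simp [List.append_assoc]

theorem fold1_eq (cs : List Char) : ∀ (lst : List (List Char)) (s : List Char),
    (let st := cs.foldl
      (fun (p : List (List Char) × List Char) c =>
        if pyBin c then (p.1, p.2 ++ [c])
        else ((if p.2 ≠ [] then p.1 ++ [p.2] else p.1) ++ [[c]], []))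
      (lst, s);
     if st.2 ≠ [] then st.1 ++ [st.2] else st.1) = lst ++ tokAux s cs := by
  induction cs with
  | nil => intro lst s; by_cases h : s = [] <;> simp [tokAux, h]
  | cons c r ih =>
      intro lst s
      simp only [List.foldl_cons]
      by_cases hb : pyBin c
      · simpa [hb, tokAux] using ih lst (s ++ [c])
      · have h2 := ih ((if s ≠ [] then lst ++ [s] else lst) ++ [[c]]) []
        by_cases hs : s = [] <;>
          simp only [hb, if_false, Bool.false_eq_true, ite_false, hs, ne_eq,
            not_true_eq_false, not_false_eq_true, ite_true] at h2 ⊢ <;>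
          · rw [h2]; simp [tokAux, hb, hs, List.append_assoc]

theorem fold2_eq (toks : List (List Char)) : ∀ (acc : List (List Char)),
    toks.foldl
      (fun acc b =>
        match b with
        | [] => acc
        | c :: _ => if !(pyBin c) then acc ++ [b] else spoolWhile b.length b acc)
      acc
    = acc ++ toks.flatMap (fun t =>
        match t with
        | [] => ([] : List (List Char))
        | c :: _ => if !(pyBin c) then [t] else spoolWhile t.length t []) := by
  induction toks with
  | nil => intro acc; simp
  | cons t ts ih =>
      intro acc
      simp only [List.foldl_cons, List.flatMap_cons]
      match t with
      | [] => simpa using ih acc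
      | c :: u =>
          by_cases hb : pyBin c
          · simp only [hb]
            rw [ih, spoolWhile_acc]
            simp [List.append_assoc]
          · have hcond : (!pyBin c) = true := by simp [hb]
            simp only [hcond, if_true]
            rw [ih]
            simp [List.append_assoc]

theorem tokRun (r : List Char) : ∀ (s : List Char), s ≠ [] →
    tokAux s r = (s ++ r.takeWhile pyBin) :: tokAux [] (r.dropWhile pyBin) := by
  induction r with
  | nil => intro s hs; simp [tokAux, hs]
  | cons c r' ih =>
      intro s hs
      by_cases hb : pyBin c
      · simp only [tokAux, hb, if_true, List.takeWhile_cons, List.dropWhile_cons]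
        rw [ih (s ++ [c]) (by simp)]
        simp [hb, List.append_assoc]
      · simp [tokAux, hb, hs, List.takeWhile_cons, List.dropWhile_cons]

theorem parse_zeros (t : List Char) (h : ∀ c ∈ t, c = '0') :
    t.foldl (fun a c => 10 * a + (c.toNat - 48)) 0 = 0 := by
  induction t with
  | nil => rfl
  | cons c r ih =>
      have hc := h c (by simp)
      simp only [List.foldl_cons, hc]
      exact ih (fun c hc => h c (by simp [hc]))

theorem parse_dropzeros (t : List Char) :
    t.foldl (fun a c => 10 * a + (c.toNat - 48)) 0
      = (t.dropWhile (fun c => c == '0')).foldl (fun a c => 10 * a + (c.toNat - 48)) 0 := by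
  induction t with
  | nil => rfl
  | cons c r ih =>
      by_cases hc : c = '0'
      · simpa [hc, List.dropWhile_cons] using ih
      · simp [hc, List.dropWhile_cons]

theorem parse_mono (t : List Char) : ∀ a : Nat,
    a ≤ t.foldl (fun a c => 10 * a + (c.toNat - 48)) a := by
  induction t with
  | nil => intro a; simp
  | cons c r ih =>
      intro a
      simp only [List.foldl_cons]
      exact le_trans (by omega) (ih (10 * a + (c.toNat - 48)))

theorem print_parse (ds : List Char) : (∀ c ∈ ds, pyBin c) → ∀ h : ds ≠ [],
    ds.head h = '1' → printDec (ds.foldl (fun a c => 10 * a + (c.toNat - 48)) 0) = ds := by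
  induction ds using List.reverseRecOn with
  | nil => intro _ h; exact absurd rfl h
  | append_singleton ds' c ih =>
      intro hbin h hh
      have hc : pyBin c := hbin c (by simp)
      rw [List.foldl_append]
      simp only [List.foldl_cons, List.foldl_nil]
      rcases eq_or_ne ds' [] with hds | hds
      · subst hds
        have hc1 : c = '1' := by simpa using hh
        subst hc1
        simp only [List.foldl_nil, List.nil_append]
        have h1 : (10 * 0 + ('1'.toNat - 48)) = 1 := by decide
        rw [h1, printDec]
        decide
      · obtain ⟨d, t, rfl⟩ := List.exists_cons_of_ne_nil hds
        have hh' : (d :: t).head (by simp) = '1' := by simpa using hh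
        have hd1 : d = '1' := by simpa using hh'
        have hp1 : 1 ≤ (d :: t).foldl (fun a c => 10 * a + (c.toNat - 48)) 0 := by
          subst hd1
          simpa using parse_mono t 1
        set p := (d :: t).foldl (fun a c => 10 * a + (c.toNat - 48)) 0 with hp
        have hv : c.toNat - 48 < 10 := by
          rcases (by simpa [pyBin] using hc : c = '0' ∨ c = '1') with rfl | rfl <;> decide
        have h10 : ¬(10 * p + (c.toNat - 48) < 10) := by omega
        rw [printDec]
        simp only [h10, dite_false]
        have hdiv : (10 * p + (c.toNat - 48)) / 10 = p := by omega
        have hmod : (10 * p + (c.toNat - 48)) % 10 = c.toNat - 48 := by omega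
        rw [hdiv, hmod]
        have hdc : Nat.digitChar (c.toNat - 48) = c := by
          rcases (by simpa [pyBin] using hc : c = '0' ∨ c = '1') with rfl | rfl <;> rfl
        rw [hdc, ih (fun x hx => hbin x (by simp at hx ⊢; tauto)) (by simp) hh']

theorem strip_eq (b : List Char) (hne : b ≠ []) (hbin : ∀ c ∈ b, pyBin c) :
    pyStrInt b = (if b.dropWhile (fun c => c == '0') = [] then ['0']
                  else b.dropWhile (fun c => c == '0')) := by
  unfold pyStrInt parseDec
  by_cases hz : b.dropWhile (fun c => c == '0') = []
  · have hall : ∀ c ∈ b, c = '0' := by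
      intro c hc
      have := List.dropWhile_eq_nil_iff.mp hz
      simpa using this c hc
    rw [parse_zeros b hall, if_pos hz, printDec]
    decide
  · rw [parse_dropzeros]
    set s := b.dropWhile (fun c => c == '0') with hs
    have hsb : ∀ c ∈ s, pyBin c := fun c hc => hbin c ((List.dropWhile_sublist _).mem hc)
    have hhead : s.head hz = '1' := by
      have hnot : ¬((s.head hz) == '0') := by
        have := List.head_dropWhile_not (fun c => c == '0') hz
        simpa [hs] using this
      have := hsb (s.head hz) (List.head_mem hz)
      rcases (by simpa [pyBin] using this : s.head hz = '0' ∨ s.head hz = '1') with h0 | h1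
      · exact absurd (by simp [h0]) hnot
      · exact h1
    rw [print_parse s hsb hz hhead]
    simp [hz]

theorem rep_not_bin (n : Nat) : (List.replicate n 't').any pyBin = false := by
  simp [List.any_replicate, pyBin]

theorem letter_not_bin (z : Nat) (h : z % 20 > 0) :
    pyBin (Char.ofNat ('a'.toNat - 1 + z % 20)) = false := by
  have h2 : z % 20 < 20 := Nat.mod_lt _ (by norm_num)
  set r := z % 20 with hr
  interval_cases r <;> decide

theorem hexFix_self (l : List Char) (h : l.any pyBin = false) : hexFix l = l := by
  simp [hexFix, h]

theorem encodeRun_nil (f : Nat) : encodeRun f [] = [] := by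
  cases f <;> rfl

-- the zero-prefix pieces of one pass, after pass 3, joined
theorem zflat (z : Nat) :
    ((if z > 0 then
        (([] : List (List Char)) ++ [List.replicate (z / 20) 't']) ++
          (if z % 20 > 0 then [[Char.ofNat ('a'.toNat - 1 + z % 20)]] else [])
      else ([] : List (List Char))).map hexFix).flatten
    = (if z % 20 > 0 then
         List.replicate (z / 20) 't' ++ [Char.ofNat ('a'.toNat - 1 + z % 20)]
       else List.replicate (z / 20) 't') := by
  have h1 : hexFix (List.replicate (z / 20) 't') = List.replicate (z / 20) 't' :=
    hexFix_self _ (rep_not_bin _)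
  by_cases hm : z % 20 > 0
  · have h2 : hexFix [Char.ofNat ('a'.toNat - 1 + z % 20)] = [Char.ofNat ('a'.toNat - 1 + z % 20)] :=
      hexFix_self _ (by simp only [List.any_cons, List.any_nil, letter_not_bin z hm]; rfl)
    have hz : z > 0 := by omega
    rw [if_pos hz, if_pos hm, if_pos hm]
    simp only [List.nil_append, List.map_append, List.map_cons, List.map_nil,
      List.flatten_append, List.flatten_cons, List.flatten_nil]
    rw [h1, h2]
    simp
  · rw [if_neg hm, if_neg hm]
    by_cases hz : z > 0
    · rw [if_pos hz]
      simp only [List.nil_append, List.map_append, List.map_cons, List.map_nil,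
        List.flatten_append, List.flatten_cons, List.flatten_nil]
      rw [h1]
      simp
    · have h0 : z = 0 := by omega
      subst h0
      simp

theorem dropzeros_head (b : List Char) (hbin : ∀ c ∈ b, pyBin c)
    (hz : b.dropWhile (fun c => c == '0') ≠ []) :
    ∃ t, b.dropWhile (fun c => c == '0') = '1' :: t := by
  obtain ⟨d, t, hdt⟩ := List.exists_cons_of_ne_nil hz
  refine ⟨t, ?_⟩
  have hmem : d ∈ b := (List.dropWhile_sublist _).mem (by rw [hdt]; exact List.mem_cons_self ..)
  have hnot := List.head_dropWhile_not (fun c => c == '0') hz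
  simp only [hdt, List.head_cons] at hnot
  rw [hdt]
  rcases (by simpa [pyBin] using hbin d hmem : d = '0' ∨ d = '1') with h0 | h1
  · simp [h0] at hnot
  · rw [h1]

theorem whileLoop_eq (fuel : Nat) : ∀ (b : List Char), b ≠ [] → (∀ c ∈ b, pyBin c) →
    ((spoolWhile fuel b []).map hexFix).flatten = encodeRun fuel b := by
  induction fuel with
  | zero => intro b _ _; simp [spoolWhile, encodeRun]
  | succ f ih =>
      intro b hne hbin
      obtain ⟨c0, t0, rfl⟩ := List.exists_cons_of_ne_nil hne
      simp only [spoolWhile, encodeRun]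
      by_cases hz : (c0 :: t0).dropWhile (fun c => c == '0') = []
      · have hstr : pyStrInt (c0 :: t0) = ['0'] := by
          rw [strip_eq _ hne hbin, if_pos hz]
        rw [hstr, if_pos (rfl : (['0'] : List Char) = ['0'])]
        rw [if_neg (by simp : ¬(([] : List Char)).length > 0)]
        exact zflat _
      · obtain ⟨t, hd⟩ := dropzeros_head _ hbin hz
        have hstr : pyStrInt (c0 :: t0) = '1' :: t := by
          rw [strip_eq _ hne hbin, if_neg hz, hd]
        have hbin1 : ∀ c ∈ ('1' :: t : List Char), pyBin c := by
          intro c hc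
          rw [← hd] at hc
          exact hbin c ((List.dropWhile_sublist _).mem hc)
        rw [hstr, if_neg (by simp : ¬('1' :: t : List Char) = ['0'])]
        rw [if_pos (by simp : ('1' :: t : List Char).length > 0)]
        rw [if_neg (by simp : ¬('1' :: t : List Char) = [])]
        have hu : ('1' :: t : List Char).take 20 = '1' :: t.take 19 := by
          rw [show (20 : Nat) = 19 + 1 from rfl, List.take_succ_cons]
        have hfix : hexFix (('1' :: t : List Char).take 20)
            = printHexUpper (parseBin (('1' :: t : List Char).take 20)) := by
          rw [hexFix, if_pos]
          rw [hu]
          simp [pyBin]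
        by_cases hgt : ('1' :: t : List Char).length > 20
        · rw [if_pos hgt, spoolWhile_acc]
          have hdne : ('1' :: t : List Char).drop 20 ≠ [] := by
            apply List.ne_nil_of_length_pos
            simp only [List.length_drop]
            simp at hgt ⊢
            omega
          have hdbin : ∀ c ∈ ('1' :: t : List Char).drop 20, pyBin c :=
            fun c hc => hbin1 c ((List.drop_sublist _ _).mem hc)
          simp only [List.map_append, List.flatten_append, List.map_cons, List.map_nil,
            List.flatten_cons, List.flatten_nil]
          rw [ih _ hdne hdbin, zflat, hfix]
          simp [List.append_assoc]
        · rw [if_neg hgt]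
          have hdrop : ('1' :: t : List Char).drop 20 = [] := by
            apply List.drop_eq_nil_of_le
            omega
          rw [hdrop, encodeRun_nil]
          simp only [List.map_append, List.flatten_append, List.map_cons, List.map_nil,
            List.flatten_cons, List.flatten_nil]
          rw [zflat, hfix]
          simp [List.append_assoc]

theorem main_eq (n : Nat) : ∀ cs : List Char, cs.length ≤ n →
    (((tokAux [] cs).flatMap (fun t =>
        match t with
        | [] => ([] : List (List Char))
        | c :: _ => if !(pyBin c) then [t] else spoolWhile t.length t [])).map hexFix).flatten
    = spoolScan cs := by
  induction n with
  | zero =>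
      intro cs hlen
      have : cs = [] := List.eq_nil_of_length_eq_zero (by omega)
      subst this
      simp [tokAux, spoolScan]
  | succ n ih =>
      intro cs hlen
      match cs with
      | [] => simp [tokAux, spoolScan]
      | c :: r =>
          by_cases hb : pyBin c
          · have htok : tokAux [] (c :: r)
                = (c :: r.takeWhile pyBin) :: tokAux [] (r.dropWhile pyBin) := by
              rw [tokAux]
              rw [if_pos hb]
              simp only [List.nil_append]
              rw [tokRun r [c] (by simp)]
              simp
            rw [htok]
            rw [spoolScan]
            rw [dif_pos hb]
            simp only [List.flatMap_cons, List.map_append, List.flatten_append]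
            have hrun : (c :: r).takeWhile pyBin = c :: r.takeWhile pyBin :=
              List.takeWhile_cons_of_pos hb
            have hdrop : (c :: r).dropWhile pyBin = r.dropWhile pyBin :=
              List.dropWhile_cons_of_pos hb
            rw [hrun, hdrop]
            have htail := ih (r.dropWhile pyBin)
              (le_trans (List.length_dropWhile_le _ _) (by simpa using hlen))
            rw [htail]
            congr 1
            rw [if_neg (by simp [hb] : ¬((!pyBin c) = true))]
            exact whileLoop_eq _ _ (by simp)
              (by
                intro x hx
                rcases List.mem_cons.mp hx with rfl | hx
                · exact hb
                · exact List.mem_takeWhile_imp hx)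
          · have htok : tokAux [] (c :: r) = [c] :: tokAux [] r := by
              rw [tokAux, if_neg hb]
              simp
            rw [htok]
            rw [spoolScan]
            rw [dif_neg hb]
            simp only [List.flatMap_cons, List.map_append, List.flatten_append]
            rw [ih r (by simpa using hlen)]
            rw [if_pos (by simp [hb] : (!pyBin c) = true)]
            simp only [List.map_cons, List.map_nil, List.flatten_cons, List.flatten_nil]
            rw [hexFix_self [c] (by simp [pyBin] at hb ⊢; tauto)]
            simp

theorem master (raw : String) : spool raw = spool_alt raw := by
  unfold spool spool_alt
  have h1 := fold1_eq (sepSubst raw).toList [] []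
  dsimp only at h1 ⊢
  rw [h1, List.nil_append]
  rw [fold2_eq, List.nil_append]
  rw [main_eq (sepSubst raw).toList.length _ le_rfl]

-- ===== VERDICT (by name: the statement is the Claim_ definition above) =====
theorem spool_spec : Claim_equal_spool := by
  intro raw _
  show spool raw = spool_alt raw
  exact master raw
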